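-- pv_equiv track=rewrite | github.com/ChloeKong/RG-MPNN | molecular_network/transform/reduce_graph.py | rg_define_for_rings
-- ===== SOURCE A (Python) =====
-- def rg_define_for_rings(feat_dict, rg_dict, feat_hit_dict, high_name, low_name, rg_name):
--
--     if (high_name not in feat_dict.keys()) or (low_name not in feat_dict.keys()):
--         return rg_dict, feat_hit_dict
--
--     high = feat_dict[high_name]
--     low = feat_dict[low_name]
--
--     for x in high:
--         for y in low:
--             if (set(x)&set(y)) != set():
--                 feat_hit_dict[high_name].append(x)
--                 feat_hit_dict[low_name].append(y)
--
--                 rg_dict[rg_name].append(list(set(x)|set(y)))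
--
--     return rg_dict, feat_hit_dict
-- ===== SOURCE B (Python) =====
-- def rg_define_for_rings(feat_dict, rg_dict, feat_hit_dict, high_name, low_name, rg_name):
--
--     if (high_name not in feat_dict) or (low_name not in feat_dict):
--         return rg_dict, feat_hit_dict
--
--     high = feat_dict[high_name]
--     low = feat_dict[low_name]
--
--     # inverted index: atom -> positions (ascending) of the low rings containing it
--     index = {}
--     for j, y in enumerate(low):
--         for a in set(y):
--             index.setdefault(a, []).append(j)
--
--     for x in high:
--         cand = []
--         for a in x:
--             cand.extend(index.get(a, ()))
--         for j in sorted(set(cand)):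
--             y = low[j]
--             feat_hit_dict[high_name].append(x)
--             feat_hit_dict[low_name].append(y)
--             rg_dict[rg_name].append(list(set(x) | set(y)))
--
--     return rg_dict, feat_hit_dict
-- ===== Notes on version B (the rewrite author's own statement) =====
-- stated objective: alternative
-- what changed: Replaces the nested high-by-low scan (intersecting each pair of rings) with an inverted index atom-to-low-ring-positions built once; for each high ring the matching low rings are gathered from the index, deduplicated and emitted in low order, so only actually-matching pairs are intersected.
import Mathlib
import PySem

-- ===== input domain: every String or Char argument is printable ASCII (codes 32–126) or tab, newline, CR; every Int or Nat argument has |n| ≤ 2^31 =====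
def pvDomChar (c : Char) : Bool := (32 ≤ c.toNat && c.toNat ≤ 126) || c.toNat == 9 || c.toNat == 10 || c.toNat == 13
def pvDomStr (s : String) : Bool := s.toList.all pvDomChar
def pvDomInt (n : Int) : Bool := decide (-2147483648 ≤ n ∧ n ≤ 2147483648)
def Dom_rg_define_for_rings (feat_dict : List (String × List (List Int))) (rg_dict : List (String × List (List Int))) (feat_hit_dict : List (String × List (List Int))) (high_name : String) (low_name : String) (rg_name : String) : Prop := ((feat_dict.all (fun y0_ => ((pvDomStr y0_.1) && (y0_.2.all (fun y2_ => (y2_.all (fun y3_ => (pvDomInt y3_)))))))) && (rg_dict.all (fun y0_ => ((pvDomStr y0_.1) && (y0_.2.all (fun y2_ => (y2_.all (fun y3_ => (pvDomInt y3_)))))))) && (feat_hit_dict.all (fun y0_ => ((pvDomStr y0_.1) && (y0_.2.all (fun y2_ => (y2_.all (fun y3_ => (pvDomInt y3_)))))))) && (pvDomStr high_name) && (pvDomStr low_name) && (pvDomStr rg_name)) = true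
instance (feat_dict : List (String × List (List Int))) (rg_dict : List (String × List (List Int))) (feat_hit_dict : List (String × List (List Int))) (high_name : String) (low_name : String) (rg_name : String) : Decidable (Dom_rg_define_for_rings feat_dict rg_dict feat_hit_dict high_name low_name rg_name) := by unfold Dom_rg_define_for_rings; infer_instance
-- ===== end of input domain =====

-- B replaces A's nested high×low ring scan by an inverted index atom→low-ring positions, visiting only
-- actually-matching pairs; equivalence is about the returned pair (both Pythons also mutate
-- rg_dict/feat_hit_dict in place, in the same way).
--
-- Both Pythons contain the expression `list(set(x) | set(y))`, whose element ORDER is CPython's int-set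
-- iteration order. PySem does not model it, so each port carries a hand port of CPython's setobject
-- algorithm (open addressing, LINEAR_PROBES=9, PERTURB_SHIFT=5, ×4 growth, copy+merge union); it is
-- exact on the domain |n| ≤ 2^31, where hash(n) = n except hash(-1) = -2. The A-side uses an Array
-- hash table (pv*); the B-side an independent List-based transcription (pb*); their agreement is one
-- of the proved lemmas below.

-- ===== PORT A =====
-- A-side CPython set model (Array-backed open-addressing table)
def pvHash (n : Int) : Int := if n = -1 then -2 else n
def pvU64 (h : Int) : Nat := (h % 18446744073709551616).toNat

structure PvSet where
  table : Array (Option Int)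
  used : Nat
deriving Repr

def pvScanFree (t : Array (Option Int)) (i : Nat) : Nat → Option Nat
  | 0 => none
  | c+1 => if (t[i]?.getD none).isNone then some i else pvScanFree t (i+1) c

def pvCleanLoop (t : Array (Option Int)) (mask : Nat) (key : Int) (i perturb : Nat) : Nat → Array (Option Int)
  | 0 => t
  | fuel+1 =>
    let probes := if i + 9 ≤ mask then 9 else 0
    match pvScanFree t i (probes+1) with
    | some j => t.set! j (some key)
    | none =>
      let perturb' := perturb >>> 5
      pvCleanLoop t mask key ((i*5 + 1 + perturb') &&& mask) perturb' fuel

def pvInsertClean (t : Array (Option Int)) (mask : Nat) (key : Int) : Array (Option Int) :=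
  pvCleanLoop t mask key (pvU64 (pvHash key) &&& mask) (pvU64 (pvHash key)) (mask + 80)

def pvNewSize (minused : Nat) (sz : Nat) : Nat → Nat
  | 0 => sz
  | f+1 => if sz ≤ minused then pvNewSize minused (sz*2) f else sz

def pvResize (s : PvSet) (minused : Nat) : PvSet :=
  let newsize := pvNewSize minused 8 64
  let t := s.table.foldl (fun t k =>
    match k with
    | none => t
    | some key => pvInsertClean t (newsize - 1) key) (Array.replicate newsize none)
  { table := t, used := s.used }

inductive PvProbe where
  | free (j : Nat)
  | member
  | miss

def pvScanAdd (t : Array (Option Int)) (key : Int) (i : Nat) : Nat → PvProbe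
  | 0 => .miss
  | c+1 =>
    match t[i]?.getD none with
    | none => .free i
    | some k => if k = key then .member else pvScanAdd t key (i+1) c

def pvAddLoop (t : Array (Option Int)) (mask : Nat) (key : Int) (i perturb : Nat) : Nat → Option (Array (Option Int))
  | 0 => none
  | fuel+1 =>
    let probes := if i + 9 ≤ mask then 9 else 0
    match pvScanAdd t key i (probes+1) with
    | .free j => some (t.set! j (some key))
    | .member => none
    | .miss =>
      let perturb' := perturb >>> 5
      pvAddLoop t mask key ((i*5 + 1 + perturb') &&& mask) perturb' fuel

def pvAddEntry (s : PvSet) (key : Int) : PvSet :=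
  let mask := s.table.size - 1
  match pvAddLoop s.table mask key (pvU64 (pvHash key) &&& mask) (pvU64 (pvHash key)) (mask + 80) with
  | none => s
  | some t =>
    let s' : PvSet := { table := t, used := s.used + 1 }
    if s'.used * 5 < mask * 3 then s'
    else pvResize s' (if s'.used > 50000 then s'.used * 2 else s'.used * 4)

def pvSetOfList (xs : List Int) : PvSet :=
  xs.foldl pvAddEntry { table := Array.replicate 8 none, used := 0 }

def pvMerge (s other : PvSet) : PvSet :=
  if other.used = 0 then s
  else
    let s := if (s.used + other.used) * 5 ≥ (s.table.size - 1) * 3 then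
               pvResize s ((s.used + other.used) * 2) else s
    if s.used = 0 ∧ s.table.size = other.table.size then
      { table := other.table, used := other.used }
    else if s.used = 0 then
      { table := other.table.foldl (fun t k =>
          match k with
          | none => t
          | some key => pvInsertClean t (s.table.size - 1) key) (Array.replicate s.table.size none),
        used := other.used }
    else
      other.table.foldl (fun s k =>
        match k with
        | none => s
        | some key => pvAddEntry s key) s

-- list(set(x) | set(y)) in CPython's deterministic int-hash iteration order
def pyUnionList (x y : List Int) : List Int :=
  let r := pvMerge (pvMerge { table := Array.replicate 8 none, used := 0 } (pvSetOfList x)) (pvSetOfList y)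
  r.table.foldl (fun acc k => match k with | none => acc | some v => acc ++ [v]) []

-- the three appends A performs for a matching pair (x, y)
def pvEmit (high_name low_name rg_name : String) (x y : List Int)
    (st : PySem.Dict String (List (List Int)) × PySem.Dict String (List (List Int))) :
    PySem.Dict String (List (List Int)) × PySem.Dict String (List (List Int)) :=
  let fhd := st.2.modify high_name [] (· ++ [x])
  let fhd := fhd.modify low_name [] (· ++ [y])
  let rgd := st.1.modify rg_name [] (· ++ [pyUnionList x y])
  (rgd, fhd)

-- (set(x) & set(y)) != set()
def pvInterNonempty (x y : List Int) : Bool :=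
  !(PySem.Set.inter (PySem.Set.ofList x) (PySem.Set.ofList y)).isEmpty

def rg_define_for_rings (feat_dict : List (String × List (List Int))) (rg_dict : List (String × List (List Int))) (feat_hit_dict : List (String × List (List Int))) (high_name : String) (low_name : String) (rg_name : String) : (List (String × List (List Int))) × (List (String × List (List Int))) :=
  let fd := PySem.Dict.mk feat_dict
  if !(fd.contains high_name) || !(fd.contains low_name) then (rg_dict, feat_hit_dict)
  else
    let high := (fd.get? high_name).getD []
    let low := (fd.get? low_name).getD []
    let st := high.foldl (fun st x =>
        low.foldl (fun st y =>
          if pvInterNonempty x y then pvEmit high_name low_name rg_name x y st else st) st)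
      (PySem.Dict.mk rg_dict, PySem.Dict.mk feat_hit_dict)
    (st.1.items, st.2.items)

-- ===== PORT B =====
-- B-side CPython set model: an independent transcription of the same setobject algorithm, backed by a
-- List (Option Int) table carried in a plain pair (table, used) and written with structural recursion.
def pbHash (k : Int) : Nat := ((if k = -1 then -2 else k) % 18446744073709551616).toNat

def pbFindFree (tbl : List (Option Int)) : Nat → Nat → Option Nat
  | _, 0 => none
  | pos, c+1 =>
    match tbl.getD pos none with
    | none => some pos
    | some _ => pbFindFree tbl (pos+1) c

def pbPlaceLoop (tbl : List (Option Int)) (m : Nat) (k : Int) : Nat → Nat → Nat → List (Option Int)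
  | _, _, 0 => tbl
  | pos, pert, f+1 =>
    match pbFindFree tbl pos (if pos + 9 ≤ m then 10 else 1) with
    | some slot => tbl.set slot (some k)
    | none => pbPlaceLoop tbl m k ((pos*5 + 1 + (pert >>> 5)) &&& m) (pert >>> 5) f

def pbGrow (mu : Nat) (sz : Nat) : Nat → Nat
  | 0 => sz
  | f+1 => if mu < sz then sz else pbGrow mu (2*sz) f

def pbRebuildLoop (m : Nat) : List (Option Int) → List (Option Int) → List (Option Int)
  | [], tbl => tbl
  | none :: rest, tbl => pbRebuildLoop m rest tbl
  | some k :: rest, tbl => pbRebuildLoop m rest (pbPlaceLoop tbl m k (pbHash k &&& m) (pbHash k) (m + 80))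

def pbRebuild (p : List (Option Int) × Nat) (mu : Nat) : List (Option Int) × Nat :=
  (pbRebuildLoop (pbGrow mu 8 64 - 1) p.1 (List.replicate (pbGrow mu 8 64) none), p.2)

-- some (some j) = free slot j found, some none = key already present, none = all probes occupied
def pbProbeScan (tbl : List (Option Int)) (k : Int) : Nat → Nat → Option (Option Nat)
  | _, 0 => none
  | pos, c+1 =>
    match tbl.getD pos none with
    | none => some (some pos)
    | some v => if v = k then some none else pbProbeScan tbl k (pos+1) c

def pbAddLoop (tbl : List (Option Int)) (m : Nat) (k : Int) : Nat → Nat → Nat → Option (List (Option Int))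
  | _, _, 0 => none
  | pos, pert, f+1 =>
    match pbProbeScan tbl k pos (if pos + 9 ≤ m then 10 else 1) with
    | some (some slot) => some (tbl.set slot (some k))
    | some none => none
    | none => pbAddLoop tbl m k ((pos*5 + 1 + (pert >>> 5)) &&& m) (pert >>> 5) f

def pbAdd (p : List (Option Int) × Nat) (k : Int) : List (Option Int) × Nat :=
  let m := p.1.length - 1
  match pbAddLoop p.1 m k (pbHash k &&& m) (pbHash k) (m + 80) with
  | none => p
  | some tbl =>
    if (p.2 + 1) * 5 < m * 3 then (tbl, p.2 + 1)
    else pbRebuild (tbl, p.2 + 1) (if 50000 < p.2 + 1 then (p.2 + 1) * 2 else (p.2 + 1) * 4)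

def pbOfList : List Int → List (Option Int) × Nat → List (Option Int) × Nat
  | [], p => p
  | k :: rest, p => pbOfList rest (pbAdd p k)

def pbMergeLoop : List (Option Int) → List (Option Int) × Nat → List (Option Int) × Nat
  | [], p => p
  | none :: rest, p => pbMergeLoop rest p
  | some k :: rest, p => pbMergeLoop rest (pbAdd p k)

def pbUnion (p q : List (Option Int) × Nat) : List (Option Int) × Nat :=
  match q.2 with
  | 0 => p
  | _+1 =>
    let p' := if 3 * (p.1.length - 1) ≤ 5 * (p.2 + q.2) then pbRebuild p ((p.2 + q.2) * 2) else p
    if p'.2 = 0 then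
      if p'.1.length = q.1.length then q
      else (pbRebuildLoop (p'.1.length - 1) q.1 (List.replicate p'.1.length none), q.2)
    else pbMergeLoop q.1 p'

def pbEmptySet : List (Option Int) × Nat := (List.replicate 8 none, 0)

def pbUnionList (x y : List Int) : List Int :=
  (pbUnion (pbUnion pbEmptySet (pbOfList x pbEmptySet)) (pbOfList y pbEmptySet)).1.filterMap id

-- the three appends B performs for a matching pair (x, y)
def pbEmit (hn ln rn : String) (x y : List Int)
    (acc : PySem.Dict String (List (List Int)) × PySem.Dict String (List (List Int))) :
    PySem.Dict String (List (List Int)) × PySem.Dict String (List (List Int)) :=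
  match acc with
  | (rgd, fhd) =>
    ((rgd.modify rn [] (· ++ [pbUnionList x y])),
     ((fhd.modify hn [] (· ++ [x])).modify ln [] (· ++ [y])))

def rg_define_for_rings_alt (feat_dict : List (String × List (List Int))) (rg_dict : List (String × List (List Int))) (feat_hit_dict : List (String × List (List Int))) (high_name : String) (low_name : String) (rg_name : String) : (List (String × List (List Int))) × (List (String × List (List Int))) :=
  let fd := PySem.Dict.mk feat_dict
  match fd.get? high_name, fd.get? low_name with
  | some high, some low =>
    let inv := (PySem.List.enumerate low).foldl (fun inv p =>
        (PySem.Set.ofList p.2).foldl (fun inv a => inv.modify a [] (· ++ [p.1])) inv)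
      (PySem.Dict.mk ([] : List (Int × List Int)))
    let fin := high.foldl (fun acc x =>
        let cand := x.foldl (fun c a => c ++ inv.getD a []) []
        (PySem.List.sorted (PySem.Set.ofList cand) (fun v => v)).foldl
          (fun acc j => pbEmit high_name low_name rg_name x (PySem.List.pyGetD low j []) acc) acc)
      (PySem.Dict.mk rg_dict, PySem.Dict.mk feat_hit_dict)
    (fin.1.items, fin.2.items)
  | _, _ => (rg_dict, feat_hit_dict)

-- ===== PRECONDITION & SPEC =====
-- A (and B alike) raises KeyError when some high/low ring pair intersects but feat_hit_dict lacks
-- high_name or low_name, or rg_dict lacks rg_name; Pre_ excludes exactly those inputs.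
def Pre_rg_define_for_rings (feat_dict : List (String × List (List Int))) (rg_dict : List (String × List (List Int))) (feat_hit_dict : List (String × List (List Int))) (high_name : String) (low_name : String) (rg_name : String) : Prop :=
  ((PySem.Dict.mk feat_dict).contains high_name = true ∧
   (PySem.Dict.mk feat_dict).contains low_name = true ∧
   ∃ x ∈ ((PySem.Dict.mk feat_dict).get? high_name).getD [],
   ∃ y ∈ ((PySem.Dict.mk feat_dict).get? low_name).getD [],
   ∃ a ∈ x, a ∈ y) →
  ((PySem.Dict.mk feat_hit_dict).contains high_name = true ∧
   (PySem.Dict.mk feat_hit_dict).contains low_name = true ∧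
   (PySem.Dict.mk rg_dict).contains rg_name = true)
instance (feat_dict : List (String × List (List Int))) (rg_dict : List (String × List (List Int))) (feat_hit_dict : List (String × List (List Int))) (high_name : String) (low_name : String) (rg_name : String) : Decidable (Pre_rg_define_for_rings feat_dict rg_dict feat_hit_dict high_name low_name rg_name) := by unfold Pre_rg_define_for_rings; infer_instance

def pvWitness_rg_define_for_rings : (List (String × List (List Int))) × (List (String × List (List Int))) × (List (String × List (List Int))) × String × String × String :=
  ([("h", [[1, 2]]), ("l", [[2, 3]])], [("r", [])], [("h", []), ("l", [])], "h", "l", "r")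

def Spec_rg_define_for_rings (feat_dict : List (String × List (List Int))) (rg_dict : List (String × List (List Int))) (feat_hit_dict : List (String × List (List Int))) (high_name : String) (low_name : String) (rg_name : String) (out : (List (String × List (List Int))) × (List (String × List (List Int)))) : Prop := out = rg_define_for_rings_alt feat_dict rg_dict feat_hit_dict high_name low_name rg_name
instance (feat_dict : List (String × List (List Int))) (rg_dict : List (String × List (List Int))) (feat_hit_dict : List (String × List (List Int))) (high_name : String) (low_name : String) (rg_name : String) (out : (List (String × List (List Int))) × (List (String × List (List Int)))) : Decidable (Spec_rg_define_for_rings feat_dict rg_dict feat_hit_dict high_name low_name rg_name out) := by unfold Spec_rg_define_for_rings; infer_instance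

-- ===== CLAIM (what is proved, stated in full; the proofs are below) =====
def Claim_equal_rg_define_for_rings : Prop := ∀ (feat_dict : List (String × List (List Int))) (rg_dict : List (String × List (List Int))) (feat_hit_dict : List (String × List (List Int))) (high_name : String) (low_name : String) (rg_name : String), Dom_rg_define_for_rings feat_dict rg_dict feat_hit_dict high_name low_name rg_name → Pre_rg_define_for_rings feat_dict rg_dict feat_hit_dict high_name low_name rg_name → Spec_rg_define_for_rings feat_dict rg_dict feat_hit_dict high_name low_name rg_name (rg_define_for_rings feat_dict rg_dict feat_hit_dict high_name low_name rg_name)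

-- ===== LEMMAS AND PROOFS =====

-- ===== agreement of the two CPython set models (pb* over lists = pv* over arrays) =====

theorem pb_hash_eq (k : Int) : pbHash k = pvU64 (pvHash k) := rfl

theorem pb_getD_eq (a : Array (Option Int)) (i : Nat) :
    a.toList.getD i none = a[i]?.getD none := by
  rw [List.getD_eq_getElem?_getD, Array.getElem?_toList]

theorem pb_findFree_eq (a : Array (Option Int)) : ∀ (c i : Nat),
    pbFindFree a.toList i c = pvScanFree a i c
  | 0, i => rfl
  | c+1, i => by
    rw [pbFindFree, pvScanFree, pb_getD_eq]
    cases a[i]?.getD none with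
    | none => rfl
    | some v => simp [pb_findFree_eq a c (i+1)]

theorem pb_placeLoop_eq (m : Nat) (k : Int) : ∀ (f : Nat) (a : Array (Option Int)) (i p : Nat),
    pbPlaceLoop a.toList m k i p f = (pvCleanLoop a m k i p f).toList
  | 0, a, i, p => rfl
  | f+1, a, i, p => by
    rw [pbPlaceLoop, pvCleanLoop]
    have hpr : (if i + 9 ≤ m then 10 else 1) = (if i + 9 ≤ m then 9 else 0) + 1 := by
      split <;> rfl
    rw [hpr, pb_findFree_eq]
    cases pvScanFree a i ((if i + 9 ≤ m then 9 else 0) + 1) with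
    | none => exact pb_placeLoop_eq m k f a _ _
    | some j => simp

theorem pb_grow_eq (mu : Nat) : ∀ (f sz : Nat), pbGrow mu sz f = pvNewSize mu sz f
  | 0, sz => rfl
  | f+1, sz => by
    rw [pbGrow, pvNewSize]
    by_cases h : sz ≤ mu
    · rw [if_neg (by omega), if_pos h, Nat.mul_comm 2 sz]
      exact pb_grow_eq mu f (sz*2)
    · rw [if_pos (by omega), if_neg h]

theorem pb_rebuildLoop_eq (m : Nat) : ∀ (l : List (Option Int)) (b : Array (Option Int)),
    pbRebuildLoop m l b.toList
      = (l.foldl (fun t k => match k with | none => t | some key => pvInsertClean t m key) b).toList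
  | [], b => rfl
  | none :: rest, b => by
    rw [pbRebuildLoop, List.foldl_cons]
    exact pb_rebuildLoop_eq m rest b
  | some k :: rest, b => by
    rw [pbRebuildLoop, List.foldl_cons]
    have : pbPlaceLoop b.toList m k (pbHash k &&& m) (pbHash k) (m + 80)
        = (pvInsertClean b m k).toList := by
      rw [pb_hash_eq, pb_placeLoop_eq]; rfl
    rw [this]
    exact pb_rebuildLoop_eq m rest (pvInsertClean b m k)

-- the relation carried through every set operation: same table contents, same element count
def PbRel (s : PvSet) (p : List (Option Int) × Nat) : Prop :=
  s.table.toList = p.1 ∧ s.used = p.2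

theorem pb_rebuild_rel (s : PvSet) (p : List (Option Int) × Nat) (mu : Nat) (h : PbRel s p) :
    PbRel (pvResize s mu) (pbRebuild p mu) := by
  obtain ⟨h1, h2⟩ := h
  refine ⟨?_, h2⟩
  show (s.table.foldl (fun t k => match k with | none => t | some key => pvInsertClean t (pvNewSize mu 8 64 - 1) key) (Array.replicate (pvNewSize mu 8 64) none)).toList
      = pbRebuildLoop (pbGrow mu 8 64 - 1) p.1 (List.replicate (pbGrow mu 8 64) none)
  have hr : (List.replicate (pvNewSize mu 8 64) (none : Option Int))
      = (Array.replicate (pvNewSize mu 8 64) (none : Option Int)).toList := by simp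
  rw [← h1, pb_grow_eq, hr, pb_rebuildLoop_eq, ← Array.foldl_toList]

theorem pb_probeScan_eq (a : Array (Option Int)) (k : Int) : ∀ (c i : Nat),
    pbProbeScan a.toList k i c
      = (match pvScanAdd a k i c with
         | .free j => some (some j) | .member => some none | .miss => none)
  | 0, i => rfl
  | c+1, i => by
    rw [pbProbeScan, pvScanAdd, pb_getD_eq]
    cases a[i]?.getD none with
    | none => rfl
    | some v =>
      by_cases hv : v = k
      · simp [hv]
      · simp only [hv, if_false]
        exact pb_probeScan_eq a k c (i+1)

theorem pb_addLoop_eq (m : Nat) (k : Int) : ∀ (f : Nat) (a : Array (Option Int)) (i p : Nat),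
    pbAddLoop a.toList m k i p f = (pvAddLoop a m k i p f).map Array.toList
  | 0, a, i, p => rfl
  | f+1, a, i, p => by
    rw [pbAddLoop, pvAddLoop]
    have hpr : (if i + 9 ≤ m then 10 else 1) = (if i + 9 ≤ m then 9 else 0) + 1 := by
      split <;> rfl
    rw [hpr, pb_probeScan_eq]
    cases pvScanAdd a k i ((if i + 9 ≤ m then 9 else 0) + 1) with
    | free j => simp
    | member => rfl
    | miss => exact pb_addLoop_eq m k f a _ _

theorem pb_add_rel (s : PvSet) (p : List (Option Int) × Nat) (k : Int) (h : PbRel s p) :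
    PbRel (pvAddEntry s k) (pbAdd p k) := by
  obtain ⟨sa, su⟩ := s
  obtain ⟨pt, pn⟩ := p
  obtain ⟨h1, h2⟩ := h
  dsimp only at h1 h2
  subst h1 h2
  show PbRel
    (match pvAddLoop sa (sa.size - 1) k (pvU64 (pvHash k) &&& (sa.size - 1)) (pvU64 (pvHash k)) (sa.size - 1 + 80) with
     | none => PvSet.mk sa su
     | some t =>
       if (su + 1) * 5 < (sa.size - 1) * 3 then PvSet.mk t (su + 1)
       else pvResize (PvSet.mk t (su + 1)) (if su + 1 > 50000 then (su + 1) * 2 else (su + 1) * 4))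
    (match pbAddLoop sa.toList (sa.toList.length - 1) k (pbHash k &&& (sa.toList.length - 1)) (pbHash k) (sa.toList.length - 1 + 80) with
     | none => (sa.toList, su)
     | some tbl =>
       if (su + 1) * 5 < (sa.toList.length - 1) * 3 then (tbl, su + 1)
       else pbRebuild (tbl, su + 1) (if 50000 < su + 1 then (su + 1) * 2 else (su + 1) * 4))
  have hm : sa.toList.length - 1 = sa.size - 1 := by simp
  rw [hm, pb_hash_eq, pb_addLoop_eq]
  cases hA : pvAddLoop sa (sa.size - 1) k (pvU64 (pvHash k) &&& (sa.size - 1)) (pvU64 (pvHash k)) (sa.size - 1 + 80) with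
  | none => exact ⟨rfl, rfl⟩
  | some t =>
    simp only [Option.map_some]
    by_cases hc : (su + 1) * 5 < (sa.size - 1) * 3
    · rw [if_pos hc, if_pos hc]; exact ⟨rfl, rfl⟩
    · rw [if_neg hc, if_neg hc]
      exact pb_rebuild_rel ⟨t, su + 1⟩ (t.toList, su + 1)
        (if su + 1 > 50000 then (su + 1) * 2 else (su + 1) * 4) ⟨rfl, rfl⟩

theorem pb_ofList_rel : ∀ (xs : List Int) (s : PvSet) (p : List (Option Int) × Nat), PbRel s p →
    PbRel (xs.foldl pvAddEntry s) (pbOfList xs p)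
  | [], s, p, h => h
  | k :: rest, s, p, h => by
    rw [List.foldl_cons, pbOfList]
    exact pb_ofList_rel rest _ _ (pb_add_rel s p k h)

theorem pb_mergeLoop_rel : ∀ (l : List (Option Int)) (s : PvSet) (p : List (Option Int) × Nat), PbRel s p →
    PbRel (l.foldl (fun s k => match k with | none => s | some key => pvAddEntry s key) s) (pbMergeLoop l p)
  | [], s, p, h => h
  | none :: rest, s, p, h => by
    rw [List.foldl_cons, pbMergeLoop]
    exact pb_mergeLoop_rel rest s p h
  | some k :: rest, s, p, h => by
    rw [List.foldl_cons, pbMergeLoop]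
    exact pb_mergeLoop_rel rest _ _ (pb_add_rel s p k h)

theorem pb_union_rel (s o : PvSet) (p q : List (Option Int) × Nat)
    (hs : PbRel s p) (ho : PbRel o q) : PbRel (pvMerge s o) (pbUnion p q) := by
  obtain ⟨sa, su⟩ := s
  obtain ⟨oa, ou⟩ := o
  obtain ⟨pt, pn⟩ := p
  obtain ⟨qt, qn⟩ := q
  obtain ⟨hs1, hs2⟩ := hs
  obtain ⟨ho1, ho2⟩ := ho
  dsimp only at hs1 hs2 ho1 ho2
  subst hs1 hs2 ho1 ho2
  cases ou with
  | zero => exact ⟨rfl, rfl⟩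
  | succ n =>
    show PbRel
      (if n + 1 = 0 then PvSet.mk sa su else
        if (if (su + (n+1)) * 5 ≥ (sa.size - 1) * 3 then pvResize (PvSet.mk sa su) ((su + (n+1)) * 2) else PvSet.mk sa su).used = 0 ∧ (if (su + (n+1)) * 5 ≥ (sa.size - 1) * 3 then pvResize (PvSet.mk sa su) ((su + (n+1)) * 2) else PvSet.mk sa su).table.size = oa.size then PvSet.mk oa (n+1)
        else if (if (su + (n+1)) * 5 ≥ (sa.size - 1) * 3 then pvResize (PvSet.mk sa su) ((su + (n+1)) * 2) else PvSet.mk sa su).used = 0 then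
          PvSet.mk (oa.foldl (fun t k => match k with | none => t | some key => pvInsertClean t ((if (su + (n+1)) * 5 ≥ (sa.size - 1) * 3 then pvResize (PvSet.mk sa su) ((su + (n+1)) * 2) else PvSet.mk sa su).table.size - 1) key) (Array.replicate (if (su + (n+1)) * 5 ≥ (sa.size - 1) * 3 then pvResize (PvSet.mk sa su) ((su + (n+1)) * 2) else PvSet.mk sa su).table.size none)) (n+1)
        else oa.foldl (fun s k => match k with | none => s | some key => pvAddEntry s key) (if (su + (n+1)) * 5 ≥ (sa.size - 1) * 3 then pvResize (PvSet.mk sa su) ((su + (n+1)) * 2) else PvSet.mk sa su))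
      (if (if 3 * (sa.toList.length - 1) ≤ 5 * (su + (n+1)) then pbRebuild (sa.toList, su) ((su + (n+1)) * 2) else (sa.toList, su)).2 = 0 then
         if (if 3 * (sa.toList.length - 1) ≤ 5 * (su + (n+1)) then pbRebuild (sa.toList, su) ((su + (n+1)) * 2) else (sa.toList, su)).1.length = oa.toList.length then (oa.toList, n+1)
         else (pbRebuildLoop ((if 3 * (sa.toList.length - 1) ≤ 5 * (su + (n+1)) then pbRebuild (sa.toList, su) ((su + (n+1)) * 2) else (sa.toList, su)).1.length - 1) oa.toList (List.replicate (if 3 * (sa.toList.length - 1) ≤ 5 * (su + (n+1)) then pbRebuild (sa.toList, su) ((su + (n+1)) * 2) else (sa.toList, su)).1.length none), n+1)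
       else pbMergeLoop oa.toList (if 3 * (sa.toList.length - 1) ≤ 5 * (su + (n+1)) then pbRebuild (sa.toList, su) ((su + (n+1)) * 2) else (sa.toList, su)))
    rw [if_neg (Nat.succ_ne_zero n)]
    have hlen : sa.toList.length = sa.size := by simp
    have hcond : ((su + (n+1)) * 5 ≥ (sa.size - 1) * 3)
        ↔ (3 * (sa.toList.length - 1) ≤ 5 * (su + (n+1))) := by
      rw [hlen]; omega
    have hrel : PbRel
        (if (su + (n+1)) * 5 ≥ (sa.size - 1) * 3 then
            pvResize (PvSet.mk sa su) ((su + (n+1)) * 2) else PvSet.mk sa su)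
        (if 3 * (sa.toList.length - 1) ≤ 5 * (su + (n+1)) then
            pbRebuild (sa.toList, su) ((su + (n+1)) * 2) else (sa.toList, su)) := by
      by_cases hc : (su + (n+1)) * 5 ≥ (sa.size - 1) * 3
      · rw [if_pos hc, if_pos (hcond.mp hc)]
        exact pb_rebuild_rel (PvSet.mk sa su) (sa.toList, su) _ ⟨rfl, rfl⟩
      · rw [if_neg hc, if_neg (fun hb => hc (hcond.mpr hb))]
        exact ⟨rfl, rfl⟩
    set s' : PvSet := (if (su + (n+1)) * 5 ≥ (sa.size - 1) * 3 then pvResize (PvSet.mk sa su) ((su + (n+1)) * 2) else PvSet.mk sa su) with hs'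
    set p' : List (Option Int) × Nat := (if 3 * (sa.toList.length - 1) ≤ 5 * (su + (n+1)) then pbRebuild (sa.toList, su) ((su + (n+1)) * 2) else (sa.toList, su)) with hp'
    obtain ⟨hr1, hr2⟩ := hrel
    have hlen' : p'.1.length = s'.table.size := by rw [← hr1]; simp
    by_cases hz : s'.used = 0
    · by_cases hsz : s'.table.size = oa.size
      · rw [if_pos ⟨hz, hsz⟩, if_pos (show p'.2 = 0 by omega),
            if_pos (show p'.1.length = oa.toList.length by rw [hlen', hsz]; simp)]
        exact ⟨rfl, rfl⟩
      · rw [if_neg (by rintro ⟨_, h⟩; exact hsz h), if_pos hz, if_pos (show p'.2 = 0 by omega),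
            if_neg (show ¬ p'.1.length = oa.toList.length by rw [hlen']; simpa using hsz)]
        refine ⟨?_, rfl⟩
        show (oa.foldl (fun t k => match k with | none => t | some key => pvInsertClean t (s'.table.size - 1) key) (Array.replicate s'.table.size none)).toList
            = pbRebuildLoop (p'.1.length - 1) oa.toList (List.replicate p'.1.length none)
        have hre : (List.replicate s'.table.size (none : Option Int))
            = (Array.replicate s'.table.size (none : Option Int)).toList := by simp
        rw [hlen', hre, pb_rebuildLoop_eq, ← Array.foldl_toList]
    · rw [if_neg (by rintro ⟨h, _⟩; exact hz h), if_neg hz, if_neg (show ¬ p'.2 = 0 by omega)]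
      have := pb_mergeLoop_rel oa.toList s' p' ⟨hr1, hr2⟩
      rw [Array.foldl_toList] at this
      exact this

theorem pb_extract_eq : ∀ (l : List (Option Int)) (acc : List Int),
    l.foldl (fun acc k => match k with | none => acc | some v => acc ++ [v]) acc
      = acc ++ l.filterMap id
  | [], acc => by simp
  | none :: rest, acc => by
    rw [List.foldl_cons, pb_extract_eq rest acc]; rfl
  | some v :: rest, acc => by
    rw [List.foldl_cons, pb_extract_eq rest (acc ++ [v])]
    simp

theorem pb_unionList_eq (x y : List Int) : pyUnionList x y = pbUnionList x y := by
  unfold pyUnionList pbUnionList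
  have hempty : PbRel { table := Array.replicate 8 none, used := 0 } pbEmptySet := by
    constructor <;> simp [pbEmptySet]
  have hx : PbRel (pvSetOfList x) (pbOfList x pbEmptySet) :=
    pb_ofList_rel x _ _ hempty
  have hy : PbRel (pvSetOfList y) (pbOfList y pbEmptySet) :=
    pb_ofList_rel y _ _ hempty
  have hu := pb_union_rel _ _ _ _ (pb_union_rel _ _ _ _ hempty hx) hy
  rw [← Array.foldl_toList, hu.1, pb_extract_eq]
  rfl

theorem pb_emit_eq : pbEmit = pvEmit := by
  funext hn ln rn x y st
  cases st with
  | mk rgd fhd => simp [pbEmit, pvEmit, pb_unionList_eq]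

-- ===== the outer algorithms agree =====

-- Bool form of "x and y share an atom"
theorem pvInterNonempty_eq (x y : List Int) :
    pvInterNonempty x y = decide (∃ a ∈ x, a ∈ y) := by
  unfold pvInterNonempty
  rcases h : (PySem.Set.inter (PySem.Set.ofList x) (PySem.Set.ofList y)) with _ | ⟨b, t⟩
  · simp only [List.isEmpty_nil, Bool.not_true]
    symm; simp only [decide_eq_false_iff_not]
    rintro ⟨a, hax, hay⟩
    have : a ∈ PySem.Set.inter (PySem.Set.ofList x) (PySem.Set.ofList y) := by
      rw [PySem.Set.mem_inter]; simp [PySem.Set.mem_ofList, hax, hay]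
    rw [h] at this; exact absurd this (List.not_mem_nil)
  · simp only [List.isEmpty_cons, Bool.not_false]
    symm; simp only [decide_eq_true_iff]
    have : b ∈ PySem.Set.inter (PySem.Set.ofList x) (PySem.Set.ofList y) := by
      rw [h]; exact List.mem_cons_self
    rw [PySem.Set.mem_inter] at this
    exact ⟨b, by simpa [PySem.Set.mem_ofList] using this⟩

-- one low ring's contribution to the inverted index, at any atom a
theorem pv_index_step (y : List Int) (j : Int) (d : PySem.Dict Int (List Int)) (a : Int) :
    ((PySem.Set.ofList y).foldl (fun idx b => idx.modify b [] (· ++ [j])) d).getD a []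
      = d.getD a [] ++ (if a ∈ y then [j] else []) := by
  have h1 : (PySem.Set.ofList y).foldl (fun idx b => idx.modify b [] (· ++ [j])) d
      = ((PySem.Set.ofList y).map (fun b => (b, j))).foldl (fun idx p => idx.modify p.1 [] (· ++ [p.2])) d := by
    rw [List.foldl_map]
  rw [h1, PySem.Dict.getD_foldl_modify_append]
  congr 1
  rw [List.filter_map]
  have h2 : (PySem.Set.ofList y).filter ((fun p => p.1 == a) ∘ (fun b => (b, j)))
      = (PySem.Set.ofList y).filter (fun b => b == a) := rfl
  rw [h2, List.filter_beq]
  by_cases hm : a ∈ y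
  · have : (PySem.Set.ofList y).count a = 1 :=
      List.count_eq_one_of_mem (PySem.Set.nodup_ofList y) (by rw [PySem.Set.mem_ofList]; exact hm)
    simp [this, hm]
  · have : (PySem.Set.ofList y).count a = 0 :=
      List.count_eq_zero_of_not_mem (by rw [PySem.Set.mem_ofList]; exact hm)
    simp [this, hm]

-- value of B's inverted index at any atom a
theorem pv_index_getD (l : List (Int × List Int)) (d : PySem.Dict Int (List Int)) (a : Int) :
    (l.foldl (fun idx p =>
        (PySem.Set.ofList p.2).foldl (fun idx b => idx.modify b [] (· ++ [p.1])) idx) d).getD a []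
      = d.getD a [] ++ (l.filter (fun p => decide (a ∈ p.2))).map (·.1) := by
  induction l generalizing d with
  | nil => simp
  | cons p t ih =>
    rw [List.foldl_cons, ih, pv_index_step, List.filter_cons]
    by_cases hm : a ∈ p.2
    · simp [hm]
    · simp [hm]

-- filtering the enumeration by a predicate on the value, then dropping indices
theorem pv_enum_filter_map_snd {α : Type} (l : List α) (s : Int) (q : α → Bool) :
    ((PySem.List.enumerate l s).filter (fun p => q p.2)).map (·.2) = l.filter q := by
  induction l generalizing s with
  | nil => simp [PySem.List.enumerate]
  | cons h t ih =>
    rw [PySem.List.enumerate_cons, List.filter_cons]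
    by_cases hq : q h
    · simp only [hq, if_true, List.map_cons, List.filter_cons]
      simp [ih]
    · simp only [hq, List.filter_cons]
      simp [ih]

-- B's per-x sorted candidate list is exactly the first components of the filtered enumeration
theorem pv_hits_eq (low : List (List Int)) (x : List Int) :
    PySem.List.sorted (PySem.Set.ofList (x.foldl (fun c a =>
        c ++ ((PySem.List.enumerate low).foldl (fun idx p =>
          (PySem.Set.ofList p.2).foldl (fun idx b => idx.modify b [] (· ++ [p.1])) idx)
          (PySem.Dict.mk ([] : List (Int × List Int)))).getD a []) [])) (fun v => v)
      = ((PySem.List.enumerate low).filter (fun p => decide (∃ a ∈ x, a ∈ p.2))).map (·.1) := by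
  set E := (PySem.List.enumerate low).filter (fun p => decide (∃ a ∈ x, a ∈ p.2)) with hE
  set cand := x.foldl (fun c a =>
        c ++ ((PySem.List.enumerate low).foldl (fun idx p =>
          (PySem.Set.ofList p.2).foldl (fun idx b => idx.modify b [] (· ++ [p.1])) idx)
          (PySem.Dict.mk ([] : List (Int × List Int)))).getD a []) [] with hcand
  have hpw : (E.map (·.1)).Pairwise (· < ·) := by
    refine List.Pairwise.map _ (fun p q h => h) ?_
    exact List.Pairwise.filter _ (PySem.List.pairwise_lt_enumerate low 0)
  have hnd : (E.map (·.1)).Nodup := hpw.imp (fun h => Int.ne_of_lt h)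
  have hmemc : ∀ j : Int, j ∈ cand ↔ ∃ p ∈ PySem.List.enumerate low 0, (∃ a ∈ x, a ∈ p.2) ∧ p.1 = j := by
    intro j
    rw [hcand]
    rw [PySem.List.foldl_append_eq_flatMap (fun a =>
      ((PySem.List.enumerate low).foldl (fun idx p =>
          (PySem.Set.ofList p.2).foldl (fun idx b => idx.modify b [] (· ++ [p.1])) idx)
          (PySem.Dict.mk ([] : List (Int × List Int)))).getD a []) x]
    simp only [List.nil_append, List.mem_flatMap, pv_index_getD]
    have h0 : ∀ a : Int, (PySem.Dict.mk ([] : List (Int × List Int))).getD a [] = [] := fun _ => rfl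
    simp only [h0, List.nil_append, List.mem_map, List.mem_filter, decide_eq_true_iff]
    constructor
    · rintro ⟨a, hax, p, ⟨hp, hap⟩, rfl⟩
      exact ⟨p, hp, ⟨a, hax, hap⟩, rfl⟩
    · rintro ⟨p, hp, ⟨a, hax, hap⟩, rfl⟩
      exact ⟨a, hax, p, ⟨hp, hap⟩, rfl⟩
  have hmem : ∀ j : Int, j ∈ E.map (·.1) ↔ j ∈ PySem.Set.ofList cand := by
    intro j
    rw [PySem.Set.mem_ofList, hmemc, hE]
    simp only [List.mem_map, List.mem_filter, decide_eq_true_iff]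
    tauto
  have hperm : (E.map (·.1)).Perm (PySem.Set.ofList cand) :=
    (List.perm_ext_iff_of_nodup hnd (PySem.Set.nodup_ofList cand)).2 hmem
  exact PySem.List.sorted_eq_of_perm_of_pairwise_lt _ _ _ hperm hpw

-- the two inner loops agree for every x and every state
theorem pv_inner_eq (high_name low_name rg_name : String) (low : List (List Int)) (x : List Int)
    (st : PySem.Dict String (List (List Int)) × PySem.Dict String (List (List Int))) :
    low.foldl (fun st y =>
        if pvInterNonempty x y then pvEmit high_name low_name rg_name x y st else st) st
      = (PySem.List.sorted (PySem.Set.ofList (x.foldl (fun c a =>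
            c ++ ((PySem.List.enumerate low).foldl (fun idx p =>
              (PySem.Set.ofList p.2).foldl (fun idx b => idx.modify b [] (· ++ [p.1])) idx)
              (PySem.Dict.mk ([] : List (Int × List Int)))).getD a []) [])) (fun v => v)).foldl
          (fun st j => pvEmit high_name low_name rg_name x (PySem.List.pyGetD low j []) st) st := by
  rw [pv_hits_eq, List.foldl_map]
  set E := (PySem.List.enumerate low).filter (fun p => decide (∃ a ∈ x, a ∈ p.2)) with hE
  have h1 : E.foldl (fun st p => pvEmit high_name low_name rg_name x (PySem.List.pyGetD low p.1 []) st) st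
      = E.foldl (fun st p => pvEmit high_name low_name rg_name x p.2 st) st := by
    refine PySem.List.foldl_congr_mem _ _ _ _ (fun acc p hp => ?_)
    have hpe : p ∈ PySem.List.enumerate low 0 := List.mem_of_mem_filter hp
    rw [PySem.List.mem_enumerate_iff] at hpe
    rcases hpe with ⟨k, hk, rfl⟩
    have hz : ((0 : Int) + (k : Int)) = ((k : Nat) : Int) := by ring
    simp [hz, PySem.List.pyGetD_natCast, hk]
  rw [h1]
  have h2 : E.foldl (fun st p => pvEmit high_name low_name rg_name x p.2 st) st
      = (E.map (·.2)).foldl (fun st y => pvEmit high_name low_name rg_name x y st) st := by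
    rw [List.foldl_map]
  have h3 : E.map (·.2) = low.filter (fun y => decide (∃ a ∈ x, a ∈ y)) :=
    pv_enum_filter_map_snd low 0 (fun y => decide (∃ a ∈ x, a ∈ y))
  rw [h2, h3, List.foldl_filter]
  refine PySem.List.foldl_congr_mem _ _ _ _ (fun acc y _ => ?_)
  rw [pvInterNonempty_eq]

-- B's guard (match on both lookups) coincides with A's contains test
theorem pv_any_eq_find_isSome {α : Type} (p : α → Bool) : ∀ (l : List α),
    l.any p = (l.find? p).isSome
  | [] => rfl
  | a :: t => by
    rw [List.any_cons, List.find?]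
    cases hp : p a
    · simp [pv_any_eq_find_isSome p t]
    · simp

theorem pv_contains_isSome (d : List (String × List (List Int))) (k : String) :
    (PySem.Dict.mk d).contains k = ((PySem.Dict.mk d).get? k).isSome := by
  simp [PySem.Dict.contains, PySem.Dict.get?, pv_any_eq_find_isSome]

-- ===== VERDICT (by name: the statement is the Claim_ definition above) =====
theorem rg_define_for_rings_spec : Claim_equal_rg_define_for_rings := by
  intro feat_dict rg_dict feat_hit_dict high_name low_name rg_name _ _
  unfold Spec_rg_define_for_rings rg_define_for_rings rg_define_for_rings_alt
  rw [pb_emit_eq]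
  cases hh : (PySem.Dict.mk feat_dict).get? high_name with
  | none =>
    have : (PySem.Dict.mk feat_dict).contains high_name = false := by
      rw [pv_contains_isSome, hh]; rfl
    simp only [this, hh, Bool.not_false, Bool.true_or, if_true]
  | some high =>
    cases hl : (PySem.Dict.mk feat_dict).get? low_name with
    | none =>
      have : (PySem.Dict.mk feat_dict).contains low_name = false := by
        rw [pv_contains_isSome, hl]; rfl
      simp only [this, hh, hl, Bool.not_false, Bool.or_true, if_true]
    | some low =>
      have h1 : (PySem.Dict.mk feat_dict).contains high_name = true := by
        rw [pv_contains_isSome, hh]; rfl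
      have h2 : (PySem.Dict.mk feat_dict).contains low_name = true := by
        rw [pv_contains_isSome, hl]; rfl
      simp only [h1, h2, hh, hl, Bool.not_true, Bool.or_self, Option.getD_some]
      refine congrArg (fun st : PySem.Dict String (List (List Int)) × PySem.Dict String (List (List Int)) => (st.1.items, st.2.items)) ?_
      exact PySem.List.foldl_congr_mem _ _ _ _ (fun st x _ => pv_inner_eq high_name low_name rg_name low x st)
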